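-- pv_equiv track=rewrite | github.com/Jakov123123/Algoritmi-u-bioinformatici | 1. poglavlje/BA1L.py | PatternToNumber
-- ===== SOURCE A (Python) =====
-- def PatternToNumber(pattern):
--     res = 0
--     k = len(pattern) - 1
--     for i in list(pattern):
--         if(i == "C"):
--             res += 4**k
--         elif(i == "G"):
--             res += 2*(4**k)
--         elif(i == "T"):
--             res += 3*(4**k)
--         k -= 1
--     return res
-- ===== SOURCE B (Python) =====
-- _VAL = {'C': 1, 'G': 2, 'T': 3}
--
-- def PatternToNumber(pattern):
--     res = 0
--     for ch in pattern:
--         res = res * 4 + _VAL.get(ch, 0)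
--     return res
-- ===== Notes on version B (the rewrite author's own statement) =====
-- stated objective: simpler
-- what changed: Replaces positional-power summation (maintaining a descending exponent k and computing 4**k each step) with left-to-right Horner accumulation res = res*4 + digit via a dict lookup with default 0.
import Mathlib
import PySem

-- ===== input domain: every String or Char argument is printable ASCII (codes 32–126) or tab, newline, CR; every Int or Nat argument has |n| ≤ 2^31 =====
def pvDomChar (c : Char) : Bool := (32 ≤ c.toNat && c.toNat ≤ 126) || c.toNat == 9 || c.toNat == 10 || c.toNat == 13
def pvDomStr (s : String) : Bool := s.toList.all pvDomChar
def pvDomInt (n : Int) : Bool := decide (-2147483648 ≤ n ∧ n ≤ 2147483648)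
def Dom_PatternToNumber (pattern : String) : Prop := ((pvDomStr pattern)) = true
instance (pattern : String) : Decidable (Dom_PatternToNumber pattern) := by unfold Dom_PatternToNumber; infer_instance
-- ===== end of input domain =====

-- B replaces the per-character 4**k power summation with Horner accumulation: simpler, one multiply-add per character.


-- ===== PORT A =====
-- loop over list(pattern) with state (res, k); Python's 4**k is only evaluated with k ≥ 0
-- (k starts at len-1 and the loop body runs at most len times), so k.toNat is exact there.
def PatternToNumberLoopA : List Char → Int → Int → Int
  | [], res, _ => res
  | i :: rest, res, k =>
    let res :=
      if i = 'C' then res + 4 ^ k.toNat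
      else if i = 'G' then res + 2 * 4 ^ k.toNat
      else if i = 'T' then res + 3 * 4 ^ k.toNat
      else res
    PatternToNumberLoopA rest res (k - 1)

def PatternToNumber (pattern : String) : Int :=
  PatternToNumberLoopA pattern.toList 0 ((pattern.toList.length : Int) - 1)

-- ===== PORT B =====
def pvValDict : PySem.Dict Char Int := PySem.Dict.ofList [('C', 1), ('G', 2), ('T', 3)]

def PatternToNumber_alt (pattern : String) : Int :=
  pattern.toList.foldl (fun res ch => res * 4 + pvValDict.getD ch 0) 0

-- ===== PRECONDITION & SPEC =====
def Spec_PatternToNumber (pattern : String) (out : Int) : Prop := out = PatternToNumber_alt pattern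
instance (pattern : String) (out : Int) : Decidable (Spec_PatternToNumber pattern out) := by unfold Spec_PatternToNumber; infer_instance

-- ===== CLAIM (what is proved, stated in full; the proofs are below) =====
def Claim_equal_PatternToNumber : Prop := ∀ (pattern : String), Dom_PatternToNumber pattern → Spec_PatternToNumber pattern (PatternToNumber pattern)

-- ===== LEMMAS AND PROOFS =====

def pvVal (c : Char) : Int := pvValDict.getD c 0

theorem foldl_horner_shift (l : List Char) (a : Int) :
    l.foldl (fun res ch => res * 4 + pvVal ch) a
      = a * 4 ^ l.length + l.foldl (fun res ch => res * 4 + pvVal ch) 0 := by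
  induction l generalizing a with
  | nil => simp
  | cons c rest ih =>
    simp only [List.foldl_cons, List.length_cons]
    rw [ih (a * 4 + pvVal c), ih (0 * 4 + pvVal c)]
    ring

theorem pvValDict_mk : pvValDict = PySem.Dict.mk [('C', 1), ('G', 2), ('T', 3)] := by decide

theorem get?_mk_nil (i : Char) : (PySem.Dict.mk ([] : List (Char × Int))).get? i = none := rfl

theorem pvVal_eq (i : Char) :
    pvVal i = if i = 'C' then 1 else if i = 'G' then 2 else if i = 'T' then 3 else 0 := by
  simp only [pvVal, pvValDict_mk, PySem.Dict.getD_eq_get?_getD, PySem.Dict.get?_mk_cons,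
    get?_mk_nil]
  by_cases h1 : i = 'C'
  · subst h1; decide
  · by_cases h2 : i = 'G'
    · subst h2; decide
    · by_cases h3 : i = 'T'
      · subst h3; decide
      · have c1 : ('C' == i) = false := by
          simp only [beq_eq_false_iff_ne]; exact fun h => h1 h.symm
        have c2 : ('G' == i) = false := by
          simp only [beq_eq_false_iff_ne]; exact fun h => h2 h.symm
        have c3 : ('T' == i) = false := by
          simp only [beq_eq_false_iff_ne]; exact fun h => h3 h.symm
        simp [c1, c2, c3, h1, h2, h3]

theorem stepA_eq (res : Int) (n : Nat) (i : Char) :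
    (if i = 'C' then res + 4 ^ n
     else if i = 'G' then res + 2 * 4 ^ n
     else if i = 'T' then res + 3 * 4 ^ n
     else res) = res + pvVal i * 4 ^ n := by
  rw [pvVal_eq]
  by_cases h1 : i = 'C' <;> by_cases h2 : i = 'G' <;> by_cases h3 : i = 'T' <;>
    simp_all

theorem loopA_eq_horner (l : List Char) (res : Int) :
    PatternToNumberLoopA l res ((l.length : Int) - 1)
      = res + l.foldl (fun r ch => r * 4 + pvVal ch) 0 := by
  induction l generalizing res with
  | nil => simp [PatternToNumberLoopA]
  | cons c rest ih =>
    have hk : ((((c :: rest).length : Int) - 1)).toNat = rest.length := by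
      simp
    simp only [PatternToNumberLoopA, hk]
    have harg : ((((c :: rest).length : Int) - 1) - 1) = ((rest.length : Int) - 1) := by
      simp
    rw [harg, ih, stepA_eq, List.foldl_cons,
        foldl_horner_shift rest (0 * 4 + pvVal c)]
    ring

-- ===== VERDICT (by name: the statement is the Claim_ definition above) =====
theorem PatternToNumber_spec : Claim_equal_PatternToNumber := by
  intro pattern _
  unfold Spec_PatternToNumber PatternToNumber PatternToNumber_alt
  rw [loopA_eq_horner]
  simp [pvVal]
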